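-- pv_equiv track=rewrite | github.com/h-wei/AdventOfCode2020 | day16.py | sort
-- ===== SOURCE A (Python) =====
-- def sort(neighbors):
--     stack = [i for i, v in enumerate(neighbors) if len(v) == 1]
--     while stack:
--         v = stack.pop()
--         val = list(neighbors[v])[0]
--         for i in range(len(neighbors)):
--             if i != v and val in neighbors[i]:
--                 neighbors[i].remove(val)
--                 if len(neighbors[i]) == 1:
--                     stack.append(i)
--
--     return {n: i for i, (n,) in enumerate(neighbors)}
-- ===== SOURCE B (Python) =====
-- def sort(neighbors):
--     # Round-based fixpoint: repeatedly sweep all positions, assigning any position whose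
--     # remaining (un-taken) candidates form a singleton, until a sweep makes no progress.
--     # Non-destructive (does not mutate `neighbors`); A mutates its argument in place.
--     n = len(neighbors)
--     res = [None] * n
--     taken = set()
--     progress = True
--     while progress:
--         progress = False
--         for i in range(n):
--             if res[i] is None:
--                 rem = [x for x in neighbors[i] if x not in taken]
--                 if len(rem) == 1:
--                     res[i] = rem[0]
--                     taken.add(rem[0])
--                     progress = True
--     return {res[i]: i for i in range(n)}
-- ===== Notes on version B (the rewrite author's own statement) =====
-- stated objective: alternative
-- what changed: B replaces A's stack-driven in-place propagation (pop a singleton, erase its value from every other set, push new singletons) by round-based fixpoint sweeps over an assignment array and a set of taken values, filtering each unassigned position's candidates non-destructively until a sweep makes no progress.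
import Mathlib
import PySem

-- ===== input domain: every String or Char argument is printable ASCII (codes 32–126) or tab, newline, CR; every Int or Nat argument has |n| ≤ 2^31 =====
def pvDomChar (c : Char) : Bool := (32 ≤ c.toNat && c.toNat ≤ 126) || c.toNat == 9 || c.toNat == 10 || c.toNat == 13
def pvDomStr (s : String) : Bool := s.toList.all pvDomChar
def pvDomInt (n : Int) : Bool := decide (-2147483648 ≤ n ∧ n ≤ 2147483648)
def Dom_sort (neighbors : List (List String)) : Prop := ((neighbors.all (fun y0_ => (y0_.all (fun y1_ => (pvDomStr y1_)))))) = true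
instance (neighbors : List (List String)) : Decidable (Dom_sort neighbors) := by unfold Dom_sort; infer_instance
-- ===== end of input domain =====

-- B replaces A's stack-driven destructive propagation (pop a singleton, erase its value from every
-- other set, push new singletons) by round-based fixpoint sweeps over an assignment array and a set
-- of taken values, without mutating `neighbors` (A mutates its argument in place; the equivalence
-- proved here is about the return value).

def sumLen (ns : List (List String)) : Nat := (ns.map List.length).sum

-- ===== PORT A =====
-- inner `for i in range(len(neighbors))` loop of one resolution step
def scanA (v : Nat) (val : String) : List Nat → List (List String) × List Nat → List (List String) × List Nat
  | [], acc => acc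
  | i :: is, (cur, news) =>
    if i ≠ v ∧ val ∈ cur.getD i [] then
      let l' := (cur.getD i []).erase val
      scanA v val is (cur.set i l', if l'.length = 1 then news ++ [i] else news)
    else
      scanA v val is (cur, news)

-- cited by loopA's decreasing_by: one resolution step removes at least as many elements as it pushes
theorem sumLen_set_erase (cur : List (List String)) (i : Nat) (val : String)
    (h : val ∈ cur.getD i []) :
    sumLen (cur.set i ((cur.getD i []).erase val)) + 1 = sumLen cur := by
  induction cur generalizing i with
  | nil => simp [List.getD] at h
  | cons c cs ih =>
    cases i with
    | zero =>
      simp [List.getD] at h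
      simp [sumLen, List.getD, List.length_erase_of_mem h]
      have : 1 ≤ c.length := List.length_pos_of_mem h
      omega
    | succ n =>
      simp [List.getD] at h
      have := ih n h
      simp [sumLen, List.getD] at this ⊢
      omega

theorem scanA_meas (v : Nat) (val : String) :
    ∀ (is : List Nat) (cur : List (List String)) (news : List Nat),
      sumLen (scanA v val is (cur, news)).1 + (scanA v val is (cur, news)).2.length
        ≤ sumLen cur + news.length := by
  intro is
  induction is with
  | nil => intro cur news; simp [scanA]
  | cons i is ih =>
    intro cur news
    simp only [scanA]
    split
    · rename_i hc
      have hm := sumLen_set_erase cur i val hc.2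
      have hb := ih (cur.set i ((cur.getD i []).erase val))
        (if ((cur.getD i []).erase val).length = 1 then news ++ [i] else news)
      have hl : (if ((cur.getD i []).erase val).length = 1 then news ++ [i] else news).length
          ≤ news.length + 1 := by split <;> simp
      omega
    · exact ih cur news

-- the `while stack` loop (stack modelled head-on-top, i.e. reversed Python order)
def loopA : List (List String) → List Nat → List (List String)
  | ns, [] => ns
  | ns, v :: st =>
    match (ns.getD v []).head? with
    | none => ns
    | some val =>
      let r := scanA v val (List.range ns.length) (ns, [])
      loopA r.1 (r.2.reverse ++ st)
  termination_by ns st => sumLen ns + st.length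
  decreasing_by
    have := scanA_meas v val (List.range ns.length) ns []
    simp at this ⊢
    omega

def sort (neighbors : List (List String)) : List (String × Int) :=
  let stack := ((List.range neighbors.length).filter
      (fun i => (neighbors.getD i []).length = 1)).reverse
  let fin := loopA neighbors stack
  (List.range fin.length).map (fun i => ((fin.getD i []).headD "", (i : Int)))

-- ===== PORT B =====
-- one sweep `for i in range(n): …` over the assignment array, taken set and progress flag
def roundB (ns : List (List String)) : List Nat → List (Option String) × PySem.Set String × Bool → List (Option String) × PySem.Set String × Bool
  | [], st => st
  | i :: is, (res, taken, prog) =>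
    match res.getD i none with
    | some _ => roundB ns is (res, taken, prog)
    | none =>
      let rem := (ns.getD i []).filter (fun x => !(PySem.Set.contains taken x))
      if rem.length = 1 then
        roundB ns is (res.set i rem.head?, PySem.Set.add taken (rem.headD ""), true)
      else
        roundB ns is (res, taken, prog)

-- the `while progress` loop; the fuel argument only makes the recursion structural (within
-- Pre_sort the loop provably finishes before the fuel runs out, see loopB_main below)
def loopB (ns : List (List String)) : Nat → List (Option String) × PySem.Set String → List (Option String)
  | 0, (res, _) => res
  | fuel + 1, (res, taken) =>
    match roundB ns (List.range ns.length) (res, taken, false) with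
    | (res', taken', prog') => if prog' then loopB ns fuel (res', taken') else res'

def sort_alt (neighbors : List (List String)) : List (String × Int) :=
  let fin := loopB neighbors (neighbors.length + 1)
      (List.replicate neighbors.length none, PySem.Set.empty)
  (List.range neighbors.length).map (fun i => ((fin.getD i none).getD "", (i : Int)))

-- ===== PRECONDITION & SPEC =====
-- forced-value closure: values some set is reduced to once earlier forced values are discarded
def forcedIter (ns : List (List String)) : Nat → List String
  | 0 => []
  | k + 1 =>
    let F := forcedIter ns k
    F ++ ns.flatMap (fun l =>
      let r := l.filter (fun x => !(F.contains x))
      if r.length = 1 then r else [])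

def resolvedVal (ns : List (List String)) (l : List String) : Option String :=
  (List.range (ns.length + 1)).findSome? (fun k =>
    let r := l.filter (fun x => !((forcedIter ns k).contains x))
    if r.length = 1 then r.head? else none)

-- Pre_sort = exactly the inputs on which the Python A returns: duplicate-free candidate sets whose
-- forced-value closure resolves every set to its own value, all these values distinct; otherwise A's
-- propagation empties a set or the final one-element unpacking fails and A raises.
def Pre_sort (neighbors : List (List String)) : Prop :=
  (∀ l ∈ neighbors, l.Nodup) ∧
  (∀ l ∈ neighbors, (resolvedVal neighbors l).isSome = true) ∧
  (neighbors.map (resolvedVal neighbors)).Nodup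

instance (neighbors : List (List String)) : Decidable (Pre_sort neighbors) := by
  unfold Pre_sort; infer_instance

def pvWitness_sort : List (List String) := [["a"], ["a", "b"], ["a", "b", "c"]]

def Spec_sort (neighbors : List (List String)) (out : List (String × Int)) : Prop := out = sort_alt neighbors
instance (neighbors : List (List String)) (out : List (String × Int)) : Decidable (Spec_sort neighbors out) := by unfold Spec_sort; infer_instance

-- ===== CLAIM (what is proved, stated in full; the proofs are below) =====
def Claim_equal_sort : Prop := ∀ (neighbors : List (List String)), Dom_sort neighbors → Pre_sort neighbors → Spec_sort neighbors (sort neighbors)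

-- ===== LEMMAS AND PROOFS =====

-- `x was struck out at position j`: some other processed position owns value x
def removedAt (r : Nat → String) (P : List Nat) (j : Nat) (x : String) : Bool :=
  decide (∃ w ∈ P, w ≠ j ∧ r w = x)

-- context extracted from Pre_sort: r is the (unique) resolved value of each position
def GoodCtx (ns : List (List String)) (r : Nat → String) : Prop :=
  (∀ l ∈ ns, l.Nodup) ∧
  (∀ i < ns.length, resolvedVal ns (ns.getD i []) = some (r i)) ∧
  (∀ i j, i < ns.length → j < ns.length → r i = r j → i = j)

-- a sound set P of processed/assigned positions
def GoodP (ns : List (List String)) (r : Nat → String) (P : List Nat) : Prop :=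
  P.Nodup ∧ (∀ v ∈ P, v < ns.length) ∧
  (∀ v ∈ P, ∀ x ∈ ns.getD v [], ∃ w ∈ P, r w = x)

-- A-side state: every set is the original minus the struck-out values
def CurOK (ns : List (List String)) (r : Nat → String) (P : List Nat) (cur : List (List String)) : Prop :=
  cur.length = ns.length ∧
  ∀ j, cur.getD j [] = (ns.getD j []).filter (fun x => !removedAt r P j x)

def StackOK (ns : List (List String)) (P : List Nat) (cur : List (List String)) (stack : List Nat) : Prop :=
  stack.Nodup ∧ ∀ i, i ∈ stack ↔ (i < ns.length ∧ i ∉ P ∧ (cur.getD i []).length = 1)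

-- B-side state
def ResOK (ns : List (List String)) (r : Nat → String) (P : List Nat) (res : List (Option String)) : Prop :=
  res.length = ns.length ∧
  ∀ i, res.getD i none = if i ∈ P then some (r i) else none

def TakenOK (r : Nat → String) (P : List Nat) (taken : List String) : Prop :=
  ∀ x : String, x ∈ taken ↔ ∃ w ∈ P, r w = x

theorem getD_set_self {α : Type} (cur : List α) (i : Nat) (l d : α) (h : i < cur.length) :
    (cur.set i l).getD i d = l := by
  simp [List.getD, h]

theorem getD_set_ne {α : Type} (cur : List α) (i j : Nat) (l d : α) (h : i ≠ j) :
    (cur.set i l).getD j d = cur.getD j d := by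
  simp [List.getD, List.getElem?_set_ne h]

theorem mem_getD_pos {cur : List (List String)} {i : Nat} {x : String}
    (h : x ∈ cur.getD i []) : i < cur.length := by
  by_contra hlt
  rw [List.getD_eq_default] at h
  · simp at h
  · omega

theorem resolved_facts {ns : List (List String)} {l : List String} {x : String}
    (h : resolvedVal ns l = some x) :
    x ∈ l ∧ ∃ k, (l.filter (fun y => !((forcedIter ns k).contains y))).length = 1 ∧
      (l.filter (fun y => !((forcedIter ns k).contains y))).head? = some x := by
  unfold resolvedVal at h
  obtain ⟨k, -, hk⟩ := List.exists_of_findSome?_eq_some h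
  simp only [] at hk
  split at hk
  · rename_i hlen
    refine ⟨?_, k, hlen, hk⟩
    have hx : x ∈ l.filter (fun y => !((forcedIter ns k).contains y)) := by
      cases hl : l.filter (fun y => !((forcedIter ns k).contains y)) with
      | nil => rw [hl] at hk; simp at hk
      | cons a t => rw [hl] at hk; simp at hk; simp [hk]
    exact List.mem_of_mem_filter hx
  · simp at hk

-- a filter that keeps exactly one element of a duplicate-free list
theorem filter_eq_single {l : List String} {p : String → Bool} {a : String}
    (hnd : l.Nodup) (ha : a ∈ l) (hp : ∀ x ∈ l, (p x = true ↔ x = a)) :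
    l.filter p = [a] := by
  induction l with
  | nil => simp at ha
  | cons b t ih =>
    rcases List.mem_cons.mp ha with hb | ht
    · subst hb
      rw [List.filter_cons_of_pos ((hp a (List.mem_cons_self ..)).mpr rfl)]
      have : t.filter p = [] := by
        rw [List.filter_eq_nil_iff]
        intro x hx hpx
        have := (hp x (List.mem_cons_of_mem _ hx)).mp hpx
        exact (List.nodup_cons.mp hnd).1 (this ▸ hx)
      rw [this]
    · have hba : b ≠ a := by
        intro e; exact (List.nodup_cons.mp hnd).1 (e ▸ ht)
      rw [List.filter_cons_of_neg (by
        intro hpb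
        exact hba ((hp b (List.mem_cons_self ..)).mp hpb))]
      exact ih (List.nodup_cons.mp hnd).2 ht (fun x hx => hp x (List.mem_cons_of_mem _ hx))

theorem length_eq_one_mem {l : List String} {a : String}
    (h : l.length = 1) (ha : a ∈ l) : l = [a] := by
  cases l with
  | nil => simp at ha
  | cons b t =>
    cases t with
    | nil => simp at ha; simp [ha]
    | cons c u => simp at h

-- the value of a position is never struck out at its own position
theorem not_removed_self {ns : List (List String)} {r : Nat → String} {P : List Nat} {i : Nat}
    (hctx : GoodCtx ns r) (hP : GoodP ns r P) (hi : i < ns.length) :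
    removedAt r P i (r i) = false := by
  simp only [removedAt, decide_eq_false_iff_not]
  rintro ⟨w, hwP, hwi, hrw⟩
  exact hwi (hctx.2.2 w i (hP.2.1 w hwP) hi hrw)

theorem r_mem {ns : List (List String)} {r : Nat → String} {i : Nat}
    (hctx : GoodCtx ns r) (hi : i < ns.length) : r i ∈ ns.getD i [] := by
  exact (resolved_facts (hctx.2.1 i hi)).1

-- a processed position keeps exactly its own value
theorem proc_filter {ns : List (List String)} {r : Nat → String} {P : List Nat} {v : Nat}
    (hctx : GoodCtx ns r) (hP : GoodP ns r P) (hv : v ∈ P) :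
    (ns.getD v []).filter (fun x => !removedAt r P v x) = [r v] := by
  have hv' : v < ns.length := hP.2.1 v hv
  have hnd : (ns.getD v []).Nodup := by
    rw [List.getD_eq_getElem _ _ hv']
    exact hctx.1 _ (List.getElem_mem _)
  refine filter_eq_single hnd (r_mem hctx hv') ?_
  intro x hx
  constructor
  · intro hpx
    obtain ⟨w, hwP, hrw⟩ := hP.2.2 v hv x hx
    by_cases hwv : w = v
    · exact (hwv ▸ hrw).symm
    · exfalso
      simp only [removedAt, Bool.not_eq_eq_eq_not, Bool.not_true, decide_eq_false_iff_not] at hpx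
      exact hpx ⟨w, hwP, hwv, hrw⟩
  · intro he
    subst he
    simp [not_removed_self hctx hP hv']

-- an unprocessed position still holds its own value
theorem unproc_mem {ns : List (List String)} {r : Nat → String} {P : List Nat} {i : Nat}
    (hctx : GoodCtx ns r) (hP : GoodP ns r P) (hi : i < ns.length) (_hiP : i ∉ P) :
    r i ∈ (ns.getD i []).filter (fun x => !removedAt r P i x) := by
  rw [List.mem_filter]
  exact ⟨r_mem hctx hi, by simp [not_removed_self hctx hP hi]⟩

-- if no unprocessed position is down to one candidate, everything is processed
theorem filter_length_mono {α : Type} (l : List α) (p q : α → Bool)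
    (h : ∀ a ∈ l, p a = true → q a = true) :
    (l.filter p).length ≤ (l.filter q).length := by
  induction l with
  | nil => simp
  | cons a t ih =>
    have ih' := ih (fun x hx => h x (List.mem_cons_of_mem _ hx))
    by_cases hp : p a = true
    · rw [List.filter_cons_of_pos hp, List.filter_cons_of_pos (h a (List.mem_cons_self ..) hp)]
      simpa using ih'
    · rw [List.filter_cons_of_neg (by simpa using hp)]
      by_cases hq : q a = true
      · rw [List.filter_cons_of_pos hq]; simp; omega
      · rw [List.filter_cons_of_neg (by simpa using hq)]; exact ih'

-- every value the closure ever forces belongs to a processed position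
theorem forced_sub {ns : List (List String)} {r : Nat → String} {P : List Nat}
    (_hctx : GoodCtx ns r) (hP : GoodP ns r P)
    (hbig : ∀ i < ns.length, i ∉ P →
      2 ≤ ((ns.getD i []).filter (fun x => !removedAt r P i x)).length) :
    ∀ k, ∀ x ∈ forcedIter ns k, ∃ w ∈ P, r w = x := by
  intro k
  induction k with
  | zero => simp [forcedIter]
  | succ k ih =>
    intro x hx
    rw [forcedIter] at hx
    simp only [] at hx
    rcases List.mem_append.mp hx with hF | hfl
    · exact ih x hF
    · obtain ⟨l, hl, hxl⟩ := List.mem_flatMap.mp hfl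
      by_cases hlen : (l.filter (fun y => !((forcedIter ns k).contains y))).length = 1
      · rw [if_pos hlen] at hxl
        obtain ⟨i, hi, hil⟩ := List.mem_iff_getElem.mp hl
        have hgd : ns.getD i [] = l := by rw [List.getD_eq_getElem _ _ hi, hil]
        by_cases hiP : i ∈ P
        · exact hP.2.2 i hiP x (hgd ▸ List.mem_of_mem_filter hxl)
        · exfalso
          have hmono : ((ns.getD i []).filter (fun x => !removedAt r P i x)).length ≤
              (l.filter (fun y => !((forcedIter ns k).contains y))).length := by
            rw [hgd]
            apply filter_length_mono
            intro a _ hpa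
            simp only [removedAt, Bool.not_eq_eq_eq_not, Bool.not_true, decide_eq_false_iff_not] at hpa
            suffices h : a ∉ forcedIter ns k by simpa [List.contains_iff_mem] using h
            intro haF
            obtain ⟨w, hwP, hrw⟩ := ih a haF
            exact hpa ⟨w, hwP, fun e => hiP (e ▸ hwP), hrw⟩
          have := hbig i hi hiP
          omega
      · rw [if_neg hlen] at hxl
        simp at hxl

theorem no_stall {ns : List (List String)} {r : Nat → String} {P : List Nat}
    (hctx : GoodCtx ns r) (hP : GoodP ns r P)
    (hbig : ∀ i < ns.length, i ∉ P →
      2 ≤ ((ns.getD i []).filter (fun x => !removedAt r P i x)).length) :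
    ∀ i < ns.length, i ∈ P := by
  intro i hi
  by_contra hiP
  obtain ⟨-, k, hk1, -⟩ := resolved_facts (hctx.2.1 i hi)
  have hmono : ((ns.getD i []).filter (fun x => !removedAt r P i x)).length ≤
      ((ns.getD i []).filter (fun y => !((forcedIter ns k).contains y))).length := by
    apply filter_length_mono
    intro a _ hpa
    simp only [removedAt, Bool.not_eq_eq_eq_not, Bool.not_true, decide_eq_false_iff_not] at hpa
    suffices h : a ∉ forcedIter ns k by simpa [List.contains_iff_mem] using h
    intro haF
    obtain ⟨w, hwP, hrw⟩ := forced_sub hctx hP hbig k a haF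
    exact hpa ⟨w, hwP, fun e => hiP (e ▸ hwP), hrw⟩
  have := hbig i hi hiP
  omega

-- full description of one pass of A's inner loop
theorem scanA_spec (v : Nat) (val : String) :
    ∀ (is : List Nat), is.Nodup →
    ∀ (cur : List (List String)) (news : List Nat),
      (scanA v val is (cur, news)).1.length = cur.length ∧
      (∀ j, (scanA v val is (cur, news)).1.getD j [] =
        if j ∈ is ∧ j ≠ v ∧ val ∈ cur.getD j [] then (cur.getD j []).erase val else cur.getD j []) ∧
      (scanA v val is (cur, news)).2 =
        news ++ is.filter (fun i => decide (i ≠ v) && decide (val ∈ cur.getD i []) &&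
          decide (((cur.getD i []).erase val).length = 1)) := by
  intro is
  induction is with
  | nil =>
    intro _ cur news
    refine ⟨rfl, ?_, by simp [scanA]⟩
    intro j
    rw [if_neg (by simp)]
    rfl
  | cons i is ih =>
    intro hnd cur news
    obtain ⟨hi_nin, hnd'⟩ := List.nodup_cons.mp hnd
    by_cases hc : i ≠ v ∧ val ∈ cur.getD i []
    · have hilt : i < cur.length := mem_getD_pos hc.2
      simp only [scanA, if_pos hc]
      obtain ⟨ih1, ih2, ih3⟩ := ih hnd' (cur.set i ((cur.getD i []).erase val))
        (if ((cur.getD i []).erase val).length = 1 then news ++ [i] else news)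
      refine ⟨by rw [ih1]; simp, ?_, ?_⟩
      · intro j
        rw [ih2 j]
        by_cases hji : j = i
        · subst hji
          rw [getD_set_self _ _ _ _ hilt]
          rw [if_neg (fun hcc => hi_nin hcc.1)]
          rw [if_pos ⟨List.mem_cons_self .., hc.1, hc.2⟩]
        · rw [getD_set_ne _ _ _ _ _ (fun e => hji e.symm)]
          by_cases hjis : j ∈ is ∧ j ≠ v ∧ val ∈ cur.getD j []
          · rw [if_pos hjis, if_pos ⟨List.mem_cons_of_mem _ hjis.1, hjis.2⟩]
          · rw [if_neg hjis,
              if_neg (fun hcc => hjis ⟨(List.mem_cons.mp hcc.1).resolve_left hji, hcc.2⟩)]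
      · rw [ih3]
        have hfe : is.filter (fun i' => decide (i' ≠ v) &&
              decide (val ∈ (cur.set i ((cur.getD i []).erase val)).getD i' []) &&
              decide ((((cur.set i ((cur.getD i []).erase val)).getD i' []).erase val).length = 1))
            = is.filter (fun i' => decide (i' ≠ v) && decide (val ∈ cur.getD i' []) &&
              decide (((cur.getD i' []).erase val).length = 1)) := by
          apply List.filter_congr
          intro a ha
          rw [getD_set_ne _ _ _ _ _ (fun e => hi_nin (by rw [e]; exact ha))]
        rw [hfe, List.filter_cons]
        by_cases hlen : ((cur.getD i []).erase val).length = 1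
        · rw [if_pos hlen]
          have h1 : decide (i ≠ v) = true := by simp [hc.1]
          have h2 : decide (val ∈ cur.getD i []) = true := by simpa [List.getD] using hc.2
          have h3 : decide (((cur.getD i []).erase val).length = 1) = true := by simpa [List.getD] using hlen
          rw [h1, h2, h3]
          simp
        · rw [if_neg hlen]
          have h3 : decide (((cur.getD i []).erase val).length = 1) = false := by simpa [List.getD] using hlen
          rw [h3, Bool.and_false]
          simp
    · simp only [scanA, if_neg hc]
      obtain ⟨ih1, ih2, ih3⟩ := ih hnd' cur news
      refine ⟨ih1, ?_, ?_⟩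
      · intro j
        rw [ih2 j]
        by_cases hji : j = i
        · subst hji
          rw [if_neg (fun hcc => hi_nin hcc.1),
            if_neg (fun hcc => hc ⟨hcc.2.1, hcc.2.2⟩)]
        · by_cases hjis : j ∈ is ∧ j ≠ v ∧ val ∈ cur.getD j []
          · rw [if_pos hjis, if_pos ⟨List.mem_cons_of_mem _ hjis.1, hjis.2⟩]
          · rw [if_neg hjis,
              if_neg (fun hcc => hjis ⟨(List.mem_cons.mp hcc.1).resolve_left hji, hcc.2⟩)]
      · rw [ih3, List.filter_cons]
        have hnb : (decide (i ≠ v) && decide (val ∈ cur.getD i []) &&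
            decide (((cur.getD i []).erase val).length = 1)) = false := by
          rcases Bool.eq_false_or_eq_true (decide (i ≠ v) && decide (val ∈ cur.getD i []) &&
            decide (((cur.getD i []).erase val).length = 1)) with h | h
          · simp only [Bool.and_eq_true, decide_eq_true_eq] at h
            exact absurd ⟨h.1.1, h.1.2⟩ hc
          · exact h
        rw [hnb]
        simp


-- A's while-loop resolves every position
theorem removedAt_cons_ne (r : Nat → String) (P : List Nat) (v j : Nat) (x : String) (hvj : v ≠ j) :
    (!removedAt r (v :: P) j x) = (decide (x ≠ r v) && !removedAt r P j x) := by
  simp only [removedAt, ← decide_not]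
  rw [← Bool.decide_and, decide_eq_decide]
  constructor
  · intro h
    exact ⟨fun e => h ⟨v, List.mem_cons_self .., hvj, e.symm⟩,
      fun ⟨w, hw, hwj, hrw⟩ => h ⟨w, List.mem_cons_of_mem _ hw, hwj, hrw⟩⟩
  · rintro ⟨h1, h2⟩ ⟨w, hw, hwj, hrw⟩
    rcases List.mem_cons.mp hw with e | hw'
    · exact h1 (by rw [e] at hrw; exact hrw.symm)
    · exact h2 ⟨w, hw', hwj, hrw⟩

theorem nsj_nodup {ns : List (List String)} {r : Nat → String} (hctx : GoodCtx ns r)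
    {j : Nat} (hj : j < ns.length) : (ns.getD j []).Nodup := by
  rw [List.getD_eq_getElem _ _ hj]
  exact hctx.1 _ (List.getElem_mem _)

-- a still-unprocessed position that is down to one candidate holds exactly its own value
theorem cur_getD_singleton {ns : List (List String)} {r : Nat → String} {P : List Nat}
    {cur : List (List String)} {i : Nat} (hctx : GoodCtx ns r) (hP : GoodP ns r P)
    (hcur : CurOK ns r P cur) (hi : i < ns.length) (hiP : i ∉ P)
    (hlen : (cur.getD i []).length = 1) : cur.getD i [] = [r i] := by
  rw [hcur.2 i] at hlen ⊢
  exact length_eq_one_mem hlen (unproc_mem hctx hP hi hiP)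

-- the loop with an empty stack: nothing is pending, so everything is processed
theorem loopA_nil {ns : List (List String)} {r : Nat → String} {P : List Nat}
    {cur : List (List String)} (hctx : GoodCtx ns r) (hP : GoodP ns r P)
    (hcur : CurOK ns r P cur) (hst : StackOK ns P cur []) :
    cur.length = ns.length ∧ ∀ j < ns.length, cur.getD j [] = [r j] := by
  have hall : ∀ i < ns.length, i ∈ P := by
    apply no_stall hctx hP
    intro i hi hiP
    have hne : (cur.getD i []).length ≠ 1 := by
      intro h1
      exact (by simp : i ∉ ([] : List Nat)) ((hst.2 i).mpr ⟨hi, hiP, h1⟩)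
    rw [hcur.2 i] at hne
    have hpos : 0 < ((ns.getD i []).filter (fun x => !removedAt r P i x)).length :=
      List.length_pos_of_mem (unproc_mem hctx hP hi hiP)
    omega
  refine ⟨hcur.1, fun j hj => ?_⟩
  rw [hcur.2 j]
  exact proc_filter hctx hP (hall j hj)

theorem loopA_main {ns : List (List String)} {r : Nat → String} (hctx : GoodCtx ns r) :
    ∀ (N : Nat) (cur : List (List String)) (stack : List Nat) (P : List Nat),
      sumLen cur + stack.length ≤ N →
      GoodP ns r P → CurOK ns r P cur → StackOK ns P cur stack →
      (loopA cur stack).length = ns.length ∧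
      ∀ j < ns.length, (loopA cur stack).getD j [] = [r j] := by
  intro N
  induction N with
  | zero =>
    intro cur stack P hN hP hcur hst
    have : stack = [] := by cases stack with
      | nil => rfl
      | cons a t => simp at hN
    subst this
    rw [loopA]
    exact loopA_nil hctx hP hcur hst
  | succ N ih =>
    intro cur stack P hN hP hcur hst
    cases stack with
    | nil =>
      rw [loopA]
      exact loopA_nil hctx hP hcur hst
    | cons v st =>
      obtain ⟨hvn, hvP, hv1⟩ := (hst.2 v).mp (List.mem_cons_self ..)
      have hvfil : cur.getD v [] = [r v] := cur_getD_singleton hctx hP hcur hvn hvP hv1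
      have hvcur : v < cur.length := by rw [hcur.1]; exact hvn
      obtain ⟨hsl, hget, hnews⟩ :=
        scanA_spec v (r v) (List.range cur.length) List.nodup_range cur []
      have hstnd : st.Nodup := (List.nodup_cons.mp hst.1).2
      have hvst : v ∉ st := (List.nodup_cons.mp hst.1).1
      -- the set of processed positions grows by v
      have hP' : GoodP ns r (v :: P) := by
        refine ⟨List.nodup_cons.mpr ⟨hvP, hP.1⟩, ?_, ?_⟩
        · intro w hw
          rcases List.mem_cons.mp hw with e | hw'
          · rw [e]; exact hvn
          · exact hP.2.1 w hw'
        · intro w hw x hx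
          rcases List.mem_cons.mp hw with e | hw'
          · subst e
            by_cases hxv : x = r w
            · exact ⟨w, List.mem_cons_self .., hxv.symm⟩
            · have hxout : x ∉ cur.getD w [] := by
                rw [hvfil]
                intro hm
                exact hxv ((List.mem_singleton).mp hm)
              rw [hcur.2 w] at hxout
              have : ¬ (!removedAt r P w x) = true := by
                intro hpb
                exact hxout (List.mem_filter.mpr ⟨hx, hpb⟩)
              simp only [Bool.not_eq_true', Bool.not_eq_false] at this
              obtain ⟨w', hw'P, hw'w, hrw'⟩ := of_decide_eq_true this
              exact ⟨w', List.mem_cons_of_mem _ hw'P, hrw'⟩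
          · obtain ⟨w', hw'P, hrw'⟩ := hP.2.2 w hw' x hx
            exact ⟨w', List.mem_cons_of_mem _ hw'P, hrw'⟩
      -- the new sets are the originals minus the values struck out for v :: P
      have hcur' : CurOK ns r (v :: P)
          (scanA v (r v) (List.range cur.length) (cur, [])).1 := by
        refine ⟨by rw [hsl, hcur.1], ?_⟩
        intro j
        rw [hget j]
        by_cases hjlt : j < cur.length
        · have hjn : j < ns.length := by rw [← hcur.1]; exact hjlt
          have hjrange : j ∈ List.range cur.length := List.mem_range.mpr hjlt
          by_cases hjv : j = v
          · subst hjv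
            rw [if_neg (fun hcc => hcc.2.1 rfl), hvfil,
              (proc_filter hctx hP' (List.mem_cons_self ..) : _)]
          · by_cases hm : r v ∈ cur.getD j []
            · rw [if_pos ⟨hjrange, hjv, hm⟩, hcur.2 j]
              have hndf : ((ns.getD j []).filter (fun x => !removedAt r P j x)).Nodup :=
                (nsj_nodup hctx hjn).filter _
              rw [hndf.erase_eq_filter, List.filter_filter]
              apply List.filter_congr
              intro x _
              rw [removedAt_cons_ne r P v j x (fun e => hjv e.symm)]
              simp [bne, beq_eq_decide]
            · rw [if_neg (fun hcc => hm hcc.2.2), hcur.2 j]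
              apply List.filter_congr
              intro x hx
              rw [removedAt_cons_ne r P v j x (fun e => hjv e.symm)]
              by_cases hxv : x = r v
              · subst hxv
                have hfalse : (!removedAt r P j (r v)) = false := by
                  by_contra hb
                  simp only [Bool.not_eq_false] at hb
                  exact hm (by rw [hcur.2 j]; exact List.mem_filter.mpr ⟨hx, by simp [hb]⟩)
                rw [hfalse]
                simp
              · simp [hxv]
        · have hjn : ¬ j < ns.length := by rw [← hcur.1]; exact hjlt
          rw [if_neg (fun hcc => hjlt (List.mem_range.mp hcc.1))]
          rw [List.getD_eq_default _ _ (by omega), List.getD_eq_default _ _ (by omega)]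
          simp
      -- the new stack again collects exactly the pending singletons
      have hst' : StackOK ns (v :: P)
          (scanA v (r v) (List.range cur.length) (cur, [])).1
          ((scanA v (r v) (List.range cur.length) (cur, [])).2.reverse ++ st) := by
        constructor
        · rw [hnews]
          simp only [List.nil_append]
          apply List.Nodup.append
          · exact List.nodup_reverse.mpr (List.nodup_range.filter _)
          · exact hstnd
          · intro a ha hast
            rw [List.mem_reverse, List.mem_filter] at ha
            obtain ⟨harange, hacond⟩ := ha
            simp only [Bool.and_eq_true, decide_eq_true_eq] at hacond
            obtain ⟨hai, haiP, ha1⟩ := (hst.2 a).mp (List.mem_cons_of_mem _ hast)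
            have : cur.getD a [] = [r a] := cur_getD_singleton hctx hP hcur hai haiP ha1
            rw [this] at hacond
            have := (List.mem_singleton).mp hacond.1.2
            exact hacond.1.1 (hctx.2.2 v a hvn hai this).symm
        · intro i
          rw [hget i]
          constructor
          · intro hi
            rcases List.mem_append.mp hi with hnew | hold
            · rw [hnews, List.nil_append, List.mem_reverse, List.mem_filter] at hnew
              obtain ⟨hirange, hicond⟩ := hnew
              simp only [Bool.and_eq_true, decide_eq_true_eq] at hicond
              obtain ⟨⟨hiv, him⟩, hi1⟩ := hicond
              have hilt : i < cur.length := List.mem_range.mp hirange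
              have hin : i < ns.length := by rw [← hcur.1]; exact hilt
              have hiP : i ∉ P := by
                intro hiP
                have : cur.getD i [] = [r i] := by
                  rw [hcur.2 i]; exact proc_filter hctx hP hiP
                rw [this] at him
                exact hiv (hctx.2.2 i v hin hvn ((List.mem_singleton).mp him).symm)
              refine ⟨hin, ?_, ?_⟩
              · intro hm
                rcases List.mem_cons.mp hm with e | h
                · exact hiv e
                · exact hiP h
              · rw [if_pos ⟨hirange, hiv, him⟩]
                exact hi1
            · obtain ⟨hin, hiP, hi1⟩ := (hst.2 i).mp (List.mem_cons_of_mem _ hold)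
              have hiv : i ≠ v := fun e => hvst (e ▸ hold)
              have hsing : cur.getD i [] = [r i] :=
                cur_getD_singleton hctx hP hcur hin hiP hi1
              have hnm : r v ∉ cur.getD i [] := by
                rw [hsing]
                intro hm
                exact hiv (hctx.2.2 v i hvn hin ((List.mem_singleton).mp hm)).symm
              refine ⟨hin, ?_, ?_⟩
              · intro hm
                rcases List.mem_cons.mp hm with e | h
                · exact hiv e
                · exact hiP h
              · rw [if_neg (fun hcc => hnm hcc.2.2)]
                exact hi1
          · rintro ⟨hin, hiP', hi1⟩
            have hiv : i ≠ v := fun e => hiP' (e ▸ List.mem_cons_self ..)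
            have hiP : i ∉ P := fun h => hiP' (List.mem_cons_of_mem _ h)
            have hilt : i < cur.length := by rw [hcur.1]; exact hin
            have hirange : i ∈ List.range cur.length := List.mem_range.mpr hilt
            by_cases hm : r v ∈ cur.getD i []
            · rw [if_pos ⟨hirange, hiv, hm⟩] at hi1
              apply List.mem_append.mpr
              left
              rw [hnews, List.nil_append, List.mem_reverse, List.mem_filter]
              refine ⟨hirange, ?_⟩
              simp only [Bool.and_eq_true, decide_eq_true_eq]
              exact ⟨⟨hiv, hm⟩, hi1⟩
            · rw [if_neg (fun hcc => hm hcc.2.2)] at hi1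
              apply List.mem_append.mpr
              right
              have := (hst.2 i).mpr ⟨hin, hiP, hi1⟩
              rcases List.mem_cons.mp this with e | h
              · exact absurd e hiv
              · exact h
      -- unfold one loop iteration and recurse
      have hmeas := scanA_meas v (r v) (List.range cur.length) cur []
      have hlen' : sumLen (scanA v (r v) (List.range cur.length) (cur, [])).1 +
          ((scanA v (r v) (List.range cur.length) (cur, [])).2.reverse ++ st).length ≤ N := by
        simp only [List.length_append, List.length_reverse, List.length_cons,
          List.length_nil] at hmeas hN ⊢
        omega
      have hrec := ih _ _ _ hlen' hP' hcur' hst'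
      rw [loopA, hvfil]
      exact hrec


theorem goodP_len_le {ns : List (List String)} {r : Nat → String} {P : List Nat}
    (hP : GoodP ns r P) : P.length ≤ ns.length := by
  have hsub : P.toFinset ⊆ Finset.range ns.length := by
    intro w hw
    exact Finset.mem_range.mpr (hP.2.1 w (List.mem_toFinset.mp hw))
  calc P.length = P.toFinset.card := (List.toFinset_card_of_nodup hP.1).symm
    _ ≤ (Finset.range ns.length).card := Finset.card_le_card hsub
    _ = ns.length := Finset.card_range _

-- B's membership test against `taken` is exactly the strike-out test (for an unassigned position)
theorem taken_filter_eq {ns : List (List String)} {r : Nat → String} {P : List Nat}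
    {taken : List String} {i : Nat} (htaken : TakenOK r P taken) (hiP : i ∉ P) :
    (ns.getD i []).filter (fun x => !(PySem.Set.contains taken x)) =
    (ns.getD i []).filter (fun x => !removedAt r P i x) := by
  apply List.filter_congr
  intro x _
  have : PySem.Set.contains taken x = removedAt r P i x := by
    by_cases hx : ∃ w ∈ P, r w = x
    · have h1 : PySem.Set.contains taken x = true := by
        simpa [PySem.Set.contains] using (htaken x).mpr hx
      have h2 : removedAt r P i x = true := by
        obtain ⟨w, hw, hrw⟩ := hx
        exact decide_eq_true ⟨w, hw, fun e => hiP (e ▸ hw), hrw⟩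
      rw [h1, h2]
    · have h1 : PySem.Set.contains taken x = false := by
        rcases Bool.eq_false_or_eq_true (PySem.Set.contains taken x) with h | h
        · exact absurd ((htaken x).mp (by simpa [PySem.Set.contains] using h)) hx
        · exact h
      have h2 : removedAt r P i x = false := by
        rcases Bool.eq_false_or_eq_true (removedAt r P i x) with h | h
        · obtain ⟨w, hw, -, hrw⟩ := of_decide_eq_true h
          exact absurd ⟨w, hw, hrw⟩ hx
        · exact h
      rw [h1, h2]
  rw [this]

theorem roundB_spec {ns : List (List String)} {r : Nat → String} (hctx : GoodCtx ns r) :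
    ∀ (is : List Nat), (∀ i ∈ is, i < ns.length) →
    ∀ (res : List (Option String)) (taken : List String) (prog : Bool) (P : List Nat),
      GoodP ns r P → ResOK ns r P res → TakenOK r P taken →
      ∃ P', GoodP ns r P' ∧
        ResOK ns r P' (roundB ns is (res, taken, prog)).1 ∧
        TakenOK r P' (roundB ns is (res, taken, prog)).2.1 ∧
        ((roundB ns is (res, taken, prog) = (res, taken, prog) ∧ P' = P ∧
            ∀ i ∈ is, i ∉ P →
              ((ns.getD i []).filter (fun x => !removedAt r P i x)).length ≠ 1)
         ∨ ((roundB ns is (res, taken, prog)).2.2 = true ∧ P.length < P'.length)) := by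
  intro is
  induction is with
  | nil =>
    intro _ res taken prog P hP hres htaken
    exact ⟨P, hP, hres, htaken, Or.inl ⟨rfl, rfl, by simp⟩⟩
  | cons i is ih =>
    intro hlt res taken prog P hP hres htaken
    have hin : i < ns.length := hlt i (List.mem_cons_self ..)
    have hlt' : ∀ i' ∈ is, i' < ns.length := fun i' h => hlt i' (List.mem_cons_of_mem _ h)
    cases hgi : res.getD i none with
    | some s =>
      have hiP : i ∈ P := by
        have := hres.2 i
        rw [hgi] at this
        by_cases h : i ∈ P
        · exact h
        · rw [if_neg h] at this; exact absurd this.symm (by simp)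
      obtain ⟨P', hP', hres', htaken', hdisj⟩ := ih hlt' res taken prog P hP hres htaken
      refine ⟨P', hP', ?_, ?_, ?_⟩
      · simpa only [roundB, hgi] using hres'
      · simpa only [roundB, hgi] using htaken'
      · rcases hdisj with ⟨heq, hPP, hstall⟩ | ⟨hprog, hlen⟩
        · refine Or.inl ⟨by simpa only [roundB, hgi] using heq, hPP, ?_⟩
          intro i' hi' hi'P
          rcases List.mem_cons.mp hi' with e | h
          · exact absurd (e ▸ hiP) hi'P
          · exact hstall i' h hi'P
        · exact Or.inr ⟨by simpa only [roundB, hgi] using hprog, hlen⟩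
    | none =>
      have hiP : i ∉ P := by
        intro h
        have := hres.2 i
        rw [hgi, if_pos h] at this
        exact absurd this (by simp)
      have hremeq : (ns.getD i []).filter (fun x => !(PySem.Set.contains taken x)) =
          (ns.getD i []).filter (fun x => !removedAt r P i x) :=
        taken_filter_eq htaken hiP
      by_cases hlen1 : ((ns.getD i []).filter (fun x => !(PySem.Set.contains taken x))).length = 1
      · -- this sweep assigns position i its value r i
        have hsing : (ns.getD i []).filter (fun x => !(PySem.Set.contains taken x)) = [r i] := by
          rw [hremeq] at hlen1 ⊢
          exact length_eq_one_mem hlen1 (unproc_mem hctx hP hin hiP)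
        have hP1 : GoodP ns r (i :: P) := by
          refine ⟨List.nodup_cons.mpr ⟨hiP, hP.1⟩, ?_, ?_⟩
          · intro w hw
            rcases List.mem_cons.mp hw with e | h
            · rw [e]; exact hin
            · exact hP.2.1 w h
          · intro w hw x hx
            rcases List.mem_cons.mp hw with e | hw'
            · subst e
              by_cases hxv : x = r w
              · exact ⟨w, List.mem_cons_self .., hxv.symm⟩
              · have hxout : x ∉ ((ns.getD w []).filter (fun x => !removedAt r P w x)) := by
                  rw [← hremeq, hsing]
                  intro hm
                  exact hxv ((List.mem_singleton).mp hm)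
                have : ¬ (!removedAt r P w x) = true := by
                  intro hpb
                  exact hxout (List.mem_filter.mpr ⟨hx, hpb⟩)
                simp only [Bool.not_eq_true', Bool.not_eq_false] at this
                obtain ⟨w', hw'P, hw'w, hrw'⟩ := of_decide_eq_true this
                exact ⟨w', List.mem_cons_of_mem _ hw'P, hrw'⟩
            · obtain ⟨w', hw'P, hrw'⟩ := hP.2.2 w hw' x hx
              exact ⟨w', List.mem_cons_of_mem _ hw'P, hrw'⟩
        have hres1 : ResOK ns r (i :: P)
            (res.set i ((ns.getD i []).filter (fun x => !(PySem.Set.contains taken x))).head?) := by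
          refine ⟨by rw [List.length_set]; exact hres.1, ?_⟩
          intro j
          by_cases hji : j = i
          · subst hji
            rw [getD_set_self _ _ _ _ (by rw [hres.1]; exact hin), hsing,
              if_pos (List.mem_cons_self ..)]
            rfl
          · rw [getD_set_ne _ _ _ _ _ (fun e => hji e.symm), hres.2 j]
            by_cases hjP : j ∈ P
            · rw [if_pos hjP, if_pos (List.mem_cons_of_mem _ hjP)]
            · rw [if_neg hjP, if_neg (fun h => (List.mem_cons.mp h).elim hji hjP)]
        have htaken1 : TakenOK r (i :: P) (PySem.Set.add taken
            (((ns.getD i []).filter (fun x => !(PySem.Set.contains taken x))).headD "")) := by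
          intro x
          rw [hsing]
          simp only [List.headD_cons]
          rw [PySem.Set.mem_add]
          constructor
          · rintro (hx | hx)
            · obtain ⟨w, hw, hrw⟩ := (htaken x).mp hx
              exact ⟨w, List.mem_cons_of_mem _ hw, hrw⟩
            · exact ⟨i, List.mem_cons_self .., hx.symm⟩
          · rintro ⟨w, hw, hrw⟩
            rcases List.mem_cons.mp hw with e | hw'
            · right; rw [e] at hrw; exact hrw.symm
            · left; exact (htaken x).mpr ⟨w, hw', hrw⟩
        obtain ⟨P', hP', hres', htaken', hdisj⟩ := ih hlt' _ _ true (i :: P) hP1 hres1 htaken1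
        refine ⟨P', hP', ?_, ?_, ?_⟩
        · simpa only [roundB, hgi, if_pos hlen1] using hres'
        · simpa only [roundB, hgi, if_pos hlen1] using htaken'
        · refine Or.inr ⟨?_, ?_⟩
          · rcases hdisj with ⟨heq, -, -⟩ | ⟨hprog, -⟩
            · have : (roundB ns (i :: is) (res, taken, prog)).2.2 =
                  (roundB ns is (res.set i ((ns.getD i []).filter
                    (fun x => !(PySem.Set.contains taken x))).head?,
                    PySem.Set.add taken (((ns.getD i []).filter
                      (fun x => !(PySem.Set.contains taken x))).headD ""), true)).2.2 := by
                simp only [roundB, hgi, if_pos hlen1]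
              rw [this, heq]
            · have : (roundB ns (i :: is) (res, taken, prog)).2.2 =
                  (roundB ns is (res.set i ((ns.getD i []).filter
                    (fun x => !(PySem.Set.contains taken x))).head?,
                    PySem.Set.add taken (((ns.getD i []).filter
                      (fun x => !(PySem.Set.contains taken x))).headD ""), true)).2.2 := by
                simp only [roundB, hgi, if_pos hlen1]
              rw [this, hprog]
          · have h1 : (i :: P).length ≤ P'.length := by
              rcases hdisj with ⟨-, hPP, -⟩ | ⟨-, hlen⟩
              · rw [hPP]
              · omega
            simp only [List.length_cons] at h1
            omega
      · obtain ⟨P', hP', hres', htaken', hdisj⟩ := ih hlt' res taken prog P hP hres htaken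
        refine ⟨P', hP', ?_, ?_, ?_⟩
        · simpa only [roundB, hgi, if_neg hlen1] using hres'
        · simpa only [roundB, hgi, if_neg hlen1] using htaken'
        · rcases hdisj with ⟨heq, hPP, hstall⟩ | ⟨hprog, hlen⟩
          · refine Or.inl ⟨by simpa only [roundB, hgi, if_neg hlen1] using heq, hPP, ?_⟩
            intro i' hi' hi'P
            rcases List.mem_cons.mp hi' with e | h
            · subst e
              rw [← hremeq]
              exact hlen1
            · exact hstall i' h hi'P
          · exact Or.inr ⟨by simpa only [roundB, hgi, if_neg hlen1] using hprog, hlen⟩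

-- B's while-loop resolves every position (and the fuel suffices)
theorem loopB_main {ns : List (List String)} {r : Nat → String} (hctx : GoodCtx ns r) :
    ∀ (fuel : Nat) (res : List (Option String)) (taken : List String) (P : List Nat),
      GoodP ns r P → ResOK ns r P res → TakenOK r P taken →
      ns.length + 1 ≤ fuel + P.length →
      ∀ j < ns.length, (loopB ns fuel (res, taken)).getD j none = some (r j) := by
  intro fuel
  induction fuel with
  | zero =>
    intro res taken P hP _ _ hfuel
    have := goodP_len_le hP
    omega
  | succ fuel ih =>
    intro res taken P hP hres htaken hfuel j hj
    obtain ⟨P', hP', hres', htaken', hdisj⟩ := roundB_spec hctx (List.range ns.length)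
      (fun i hi => List.mem_range.mp hi) res taken false P hP hres htaken
    rcases hr : roundB ns (List.range ns.length) (res, taken, false) with ⟨res', taken', prog'⟩
    rw [hr] at hres' htaken' hdisj
    cases prog' with
    | false =>
      rcases hdisj with ⟨heq, hPP, hstall⟩ | ⟨hprog, -⟩
      · have hall : ∀ i < ns.length, i ∈ P := by
          apply no_stall hctx hP
          intro i hi hiP
          have hne := hstall i (List.mem_range.mpr hi) hiP
          have hpos : 0 < ((ns.getD i []).filter (fun x => !removedAt r P i x)).length :=
            List.length_pos_of_mem (unproc_mem hctx hP hi hiP)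
          omega
        have : (loopB ns (fuel + 1) (res, taken)) = res' := by
          simp [loopB, hr]
        rw [this]
        have hj' := hres'.2 j
        have hjP' : j ∈ P' := by
          rw [hPP]; exact hall j hj
        rw [if_pos hjP'] at hj'
        exact hj'
      · simp at hprog
    | true =>
      have hlenP : P.length < P'.length := by
        rcases hdisj with ⟨heq, -, -⟩ | ⟨-, h⟩
        · exact absurd (congrArg (fun t => t.2.2) heq) (by simp)
        · exact h
      have : (loopB ns (fuel + 1) (res, taken)) = loopB ns fuel (res', taken') := by
        simp [loopB, hr]
      rw [this]
      exact ih res' taken' P' hP' hres' htaken' (by omega) j hj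

-- the resolved value of each position, extracted from Pre_sort
def resFun (ns : List (List String)) : Nat → String :=
  fun i => (resolvedVal ns (ns.getD i [])).getD ""

theorem getD_replicate_none (n j : Nat) :
    (List.replicate n (none : Option String)).getD j none = none := by
  simp only [List.getD, List.getElem?_replicate]
  split <;> rfl

theorem pre_ctx {ns : List (List String)} (hpre : Pre_sort ns) : GoodCtx ns (resFun ns) := by
  have hmemns : ∀ i < ns.length, ns.getD i [] ∈ ns := by
    intro i hi
    rw [List.getD_eq_getElem _ _ hi]
    exact List.getElem_mem _
  have hres : ∀ i < ns.length, resolvedVal ns (ns.getD i []) = some (resFun ns i) := by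
    intro i hi
    have hs := hpre.2.1 _ (hmemns i hi)
    cases ho : resolvedVal ns (ns.getD i []) with
    | none => rw [ho] at hs; simp at hs
    | some a =>
      have : resFun ns i = a := by rw [resFun, ho]; rfl
      rw [this]
  refine ⟨hpre.1, hres, ?_⟩
  intro i j hi hj hrij
  have hmli : i < (ns.map (resolvedVal ns)).length := by rw [List.length_map]; exact hi
  have hmlj : j < (ns.map (resolvedVal ns)).length := by rw [List.length_map]; exact hj
  have hmi : (ns.map (resolvedVal ns))[i]'hmli = some (resFun ns i) := by
    rw [List.getElem_map, ← List.getD_eq_getElem _ _ hi]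
    exact hres i hi
  have hmj : (ns.map (resolvedVal ns))[j]'hmlj = some (resFun ns j) := by
    rw [List.getElem_map, ← List.getD_eq_getElem _ _ hj]
    exact hres j hj
  exact (List.Nodup.getElem_inj_iff hpre.2.2).mp (by rw [hmi, hmj, hrij])

-- ===== VERDICT (by name: the statement is the Claim_ definition above) =====
theorem sort_spec : Claim_equal_sort := by
  intro ns _ hpre
  show sort ns = sort_alt ns
  have hctx : GoodCtx ns (resFun ns) := pre_ctx hpre
  have hP0 : GoodP ns (resFun ns) [] := ⟨List.nodup_nil, by simp, by simp⟩
  -- A's loop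
  have hcur0 : CurOK ns (resFun ns) [] ns := by
    refine ⟨rfl, fun j => ?_⟩
    exact (List.filter_eq_self.mpr (fun x _ => by simp [removedAt])).symm
  have hst0 : StackOK ns []
      ns (((List.range ns.length).filter (fun i => (ns.getD i []).length = 1)).reverse) := by
    constructor
    · exact List.nodup_reverse.mpr (List.nodup_range.filter _)
    · intro i
      rw [List.mem_reverse, List.mem_filter, List.mem_range]
      simp
  have hA := loopA_main hctx _ ns
    (((List.range ns.length).filter (fun i => (ns.getD i []).length = 1)).reverse) []
    (Nat.le_refl _) hP0 hcur0 hst0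
  -- B's loop
  have hresB : ResOK ns (resFun ns) [] (List.replicate ns.length none) :=
    ⟨List.length_replicate, fun j => by rw [if_neg (by simp)]; exact getD_replicate_none _ _⟩
  have htakB : TakenOK (resFun ns) [] PySem.Set.empty := by
    intro x
    simp [PySem.Set.empty]
  have hB := loopB_main hctx (ns.length + 1) (List.replicate ns.length none)
    PySem.Set.empty [] hP0 hresB htakB (by simp)
  -- assemble both return values
  simp only [sort, sort_alt]
  rw [hA.1]
  apply List.map_congr_left
  intro i hi
  have hin : i < ns.length := List.mem_range.mp hi
  rw [hA.2 i hin, hB i hin]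
  rfl
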